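-- pv_equiv track=rewrite | github.com/brandonbluong/Advent_of_Code | 2022/02/main.py | parse
-- ===== SOURCE A (Python) =====
-- def parse(puzzle_input):
--     """Parse input."""
--     strat_guide = []
--     round = ""
--     for char in puzzle_input.strip("\n"):
--         if char.isalpha():
--             round += char
--         if len(round) == 2:
--             strat_guide.append(round)
--             round = ""
--
--     return strat_guide
-- ===== SOURCE B (Python) =====
-- def parse(puzzle_input):
--     """Parse input."""
--     letters = [c for c in puzzle_input if c.isalpha()]
--     pairs = []
--     i = 0
--     while i + 1 < len(letters):
--         pairs.append(letters[i] + letters[i + 1])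
--         i += 2
--     return pairs
-- ===== Notes on version B (the rewrite author's own statement) =====
-- stated objective: simpler
-- what changed: Replaces A's single stateful buffer-and-reset loop (strip, accumulate into a round string, flush at length 2) with a stateless two-phase decomposition: filter the alphabetic characters, then recursively group them into consecutive pairs.
import Mathlib
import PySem

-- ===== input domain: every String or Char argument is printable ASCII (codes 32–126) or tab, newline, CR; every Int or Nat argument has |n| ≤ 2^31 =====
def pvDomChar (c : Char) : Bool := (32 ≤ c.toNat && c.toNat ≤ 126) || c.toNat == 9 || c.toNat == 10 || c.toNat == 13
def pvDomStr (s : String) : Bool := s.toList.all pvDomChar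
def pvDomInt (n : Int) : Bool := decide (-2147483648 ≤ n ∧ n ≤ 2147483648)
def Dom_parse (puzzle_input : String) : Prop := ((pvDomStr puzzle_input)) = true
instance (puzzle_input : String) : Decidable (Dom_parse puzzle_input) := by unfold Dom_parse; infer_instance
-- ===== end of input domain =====

-- B replaces A's stateful buffer-and-reset loop with a stateless filter-then-pair decomposition (simpler; same cost).

-- ===== PORT A =====
-- loop state: (strat_guide, round); round kept as List Char (PySem string convention)
def parseStep (st : List String × List Char) (char : Char) : List String × List Char :=
  let round := if PySem.Chars.isalpha char then st.2 ++ [char] else st.2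
  if round.length = 2 then (st.1 ++ [String.ofList round], []) else (st.1, round)

def parse (puzzle_input : String) : List String :=
  ((PySem.Chars.stripChars puzzle_input.toList ['\n']).foldl parseStep ([], [])).1

-- ===== PORT B =====
-- the while-loop: pairs accumulated, index advances by 2
def pairLoop (letters : List Char) (pairs : List String) (i : Nat) : List String :=
  if h : i + 1 < letters.length then
    pairLoop letters (pairs ++ [String.ofList [letters[i], letters[i + 1]]]) (i + 2)
  else pairs
termination_by letters.length - i

def parse_alt (puzzle_input : String) : List String :=
  pairLoop (puzzle_input.toList.filter PySem.Chars.isalpha) [] 0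

-- ===== PRECONDITION & SPEC =====
def Spec_parse (puzzle_input : String) (out : List String) : Prop := out = parse_alt puzzle_input
instance (puzzle_input : String) (out : List String) : Decidable (Spec_parse puzzle_input out) := by unfold Spec_parse; infer_instance

-- ===== CLAIM (what is proved, stated in full; the proofs are below) =====
def Claim_equal_parse : Prop := ∀ (puzzle_input : String), Dom_parse puzzle_input → Spec_parse puzzle_input (parse puzzle_input)

-- ===== LEMMAS AND PROOFS =====

-- proof-side view of B's pairing loop: consecutive pairs of a character list
def pairsOf : List Char → List String
  | a :: b :: rest => String.ofList [a, b] :: pairsOf rest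
  | _ => []

theorem pairLoop_eq (letters : List Char) : ∀ (pairs : List String) (i : Nat),
    pairLoop letters pairs i = pairs ++ pairsOf (letters.drop i) := by
  intro pairs i
  induction pairs, i using pairLoop.induct letters with
  | case1 pairs i h ih =>
    rw [pairLoop, dif_pos h, ih]
    have h1 : i < letters.length := by omega
    rw [List.drop_eq_getElem_cons h1, List.drop_eq_getElem_cons h]
    simp [pairsOf]
  | case2 pairs i h =>
    rw [pairLoop, dif_neg h]
    have : (letters.drop i).length ≤ 1 := by simp; omega
    match hd : letters.drop i, this with
    | [], _ => simp [pairsOf]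
    | [b], _ => simp [pairsOf]

-- stripping newlines (non-alpha) from the ends does not change the alphabetic characters
theorem filter_dropWhile_newline (l : List Char) :
    (l.dropWhile (fun c => [('\n' : Char)].contains c)).filter PySem.Chars.isalpha
      = l.filter PySem.Chars.isalpha := by
  induction l with
  | nil => rfl
  | cons c cs ih =>
    by_cases h : c = '\n'
    · subst h
      simpa [List.dropWhile_cons, List.filter_cons] using ih
    · simp [List.dropWhile_cons, h]

theorem filter_stripChars_newline (l : List Char) :
    (PySem.Chars.stripChars l ['\n']).filter PySem.Chars.isalpha
      = l.filter PySem.Chars.isalpha := by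
  simp only [PySem.Chars.stripChars, List.filter_reverse, filter_dropWhile_newline,
    List.reverse_reverse]

-- the loop invariant: from a round buffer of length ≤ 1, the fold produces the pairs of
-- (buffer ++ alphabetic characters), appended to the accumulator
theorem foldl_parseStep (cs : List Char) : ∀ (acc : List String) (buf : List Char),
    buf.length ≤ 1 →
    (cs.foldl parseStep (acc, buf)).1 = acc ++ pairsOf (buf ++ cs.filter PySem.Chars.isalpha) := by
  induction cs with
  | nil =>
    intro acc buf hbuf
    match buf, hbuf with
    | [], _ => simp [pairsOf]
    | [b], _ => simp [pairsOf]
  | cons c cs ih =>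
    intro acc buf hbuf
    by_cases hc : PySem.Chars.isalpha c
    · match buf, hbuf with
      | [], _ =>
        simp only [List.foldl_cons, parseStep, hc, if_true, List.nil_append]
        rw [if_neg (by simp)]
        rw [ih acc [c] (by simp)]
        simp [List.filter_cons, hc]
      | [b], _ =>
        simp only [List.foldl_cons, parseStep, hc, if_true, List.singleton_append]
        rw [if_pos (by simp)]
        rw [ih (acc ++ [String.ofList [b, c]]) [] (by simp)]
        simp [List.filter_cons, hc, pairsOf]
    · match buf, hbuf with
      | [], _ =>
        simp only [List.foldl_cons, parseStep, hc, Bool.false_eq_true, if_false]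
        rw [if_neg (by simp)]
        rw [ih acc [] (by simp)]
        simp [List.filter_cons, hc]
      | [b], _ =>
        simp only [List.foldl_cons, parseStep, hc, Bool.false_eq_true, if_false]
        rw [if_neg (by simp)]
        rw [ih acc [b] (by simp)]
        simp [List.filter_cons, hc]

-- ===== VERDICT (by name: the statement is the Claim_ definition above) =====
theorem parse_spec : Claim_equal_parse := by
  intro s _
  unfold Spec_parse parse parse_alt
  rw [pairLoop_eq, List.drop_zero, List.nil_append]
  rw [foldl_parseStep _ [] [] (by simp)]
  simp [filter_stripChars_newline]
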